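-- pv_equiv track=rewrite | github.com/jihunkeom/Algorithm | 프로그래머스/lv2/17683. ［3차］ 방금그곡/［3차］ 방금그곡.py | solution
-- ===== SOURCE A (Python) =====
-- def convert_mapping(data):
--     sharp = {
--         "C#": "c",
--         "D#": "d",
--         "F#": "f",
--         "G#": "g",
--         "A#": "a",
--         "E#": "e",
--     }
--     tmp = []
--     for x in data:
--         if x == "#":
--             chord = tmp.pop()
--             tmp.append(sharp[chord + "#"])
--         else:
--             tmp.append(x)
--     return "".join(tmp)
--
-- def solution(m, musicinfos):
--     answer = []
--     m = convert_mapping(m)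
--
--     for i in range(len(musicinfos)):
--         music = musicinfos[i]
--         music = music.split(",")
--         start_time, end_time, title, chord = music
--         start_time, end_time = start_time.split(":"), end_time.split(":")
--         start_time = 60*int(start_time[0])+int(start_time[1])
--         end_time = 60*int(end_time[0])+int(end_time[1])
--         play_time = end_time-start_time
--         if play_time <= 0:
--             continue
--
--         chord_list = convert_mapping(chord)
--         if len(chord_list) > play_time:
--             chord_list = chord_list[:play_time]
--         else:
--             repeat = play_time//len(chord_list)
--             chord_list = chord_list * repeat
--             chord_list += chord_list[:play_time-len(chord_list)]
--
--         if m in chord_list: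
--             answer.append((play_time, i, title))
--
--     if len(answer) > 0:
--         answer = sorted(answer, key=lambda x: (-x[0], x[1]))
--         return answer[0][-1]
--     else:
--         return "(None)"
-- ===== SOURCE B (Python) =====
-- SHARP = {"C": "c", "D": "d", "F": "f", "G": "g", "A": "a", "E": "e"}
--
-- def decode(data):
--     # lookahead pass: a letter followed by '#' becomes its lowercase code
--     out = []
--     i = 0
--     while i < len(data):
--         if i + 1 < len(data) and data[i + 1] == "#":
--             out.append(SHARP[data[i]])
--             i += 2
--         else:
--             out.append(data[i])
--             i += 1
--     return "".join(out)
--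
-- def occurs(target, mel, play_time):
--     # does target occur in the first play_time notes of mel repeated forever?
--     # a start position only matters modulo len(mel), and the smallest position
--     # with a given residue s is s itself, so s + len(target) <= play_time suffices
--     L, T = len(mel), len(target)
--     return any(
--         s + T <= play_time and all(target[k] == mel[(s + k) % L] for k in range(T))
--         for s in range(L)
--     )
--
-- def solution(m, musicinfos):
--     target = decode(m)
--     best_time, best_title = 0, "(None)"
--     for info in musicinfos:
--         start, end, title, chord = info.split(",")
--         sp, ep = start.split(":"), end.split(":")
--         play_time = (60 * int(ep[0]) + int(ep[1])) - (60 * int(sp[0]) + int(sp[1]))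
--         if play_time <= 0:
--             continue
--         mel = decode(chord)
--         if occurs(target, mel, play_time) and play_time > best_time:
--             best_time, best_title = play_time, title
--     return best_title
-- ===== Notes on version B (the rewrite author's own statement) =====
-- stated objective: alternative
-- what changed: B never materialises the tiled chord string or a match list: it decodes sharps with a lookahead scan instead of A's pop-and-remap stack, decides the match arithmetically by testing the len(melody) cyclic start residues with modular indexing instead of A's repeat-slice-concatenate plus substring 'in', and keeps a running best with strict '>' instead of A's sorted(key=(-play_time, i)) over a list of all matches.
import Mathlib
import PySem

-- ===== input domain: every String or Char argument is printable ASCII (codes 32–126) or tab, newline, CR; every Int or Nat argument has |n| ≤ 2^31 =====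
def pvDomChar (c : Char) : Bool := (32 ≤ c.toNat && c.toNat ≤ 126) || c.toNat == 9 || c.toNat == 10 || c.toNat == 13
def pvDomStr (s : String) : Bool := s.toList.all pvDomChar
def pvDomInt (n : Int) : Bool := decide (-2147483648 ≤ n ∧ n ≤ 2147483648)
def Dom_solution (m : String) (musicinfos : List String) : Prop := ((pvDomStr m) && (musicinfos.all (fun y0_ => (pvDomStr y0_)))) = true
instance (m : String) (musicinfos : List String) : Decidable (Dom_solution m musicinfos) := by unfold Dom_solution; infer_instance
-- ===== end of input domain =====

-- B never builds the tiled chord string or a match list: it decodes sharps by lookahead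
-- instead of A's pop-and-remap stack, decides the match by testing the cyclic start
-- residues with modular indexing instead of A's repeat-slice-concatenate + substring 'in',
-- and keeps a running best instead of A's sort of all matches; objective: alternative.

-- ===== PORT A =====
-- sharp = {"C#": "c", ...} as a character lookup; none = KeyError
def sharpChar? (c : Char) : Option Char :=
  if c = 'C' then some 'c'
  else if c = 'D' then some 'd'
  else if c = 'F' then some 'f'
  else if c = 'G' then some 'g'
  else if c = 'A' then some 'a'
  else if c = 'E' then some 'e'
  else none

-- A's convert_mapping: stack of emitted chars, '#' pops and remaps; none exactly where
-- Python raises (tmp.pop() on empty tmp = IndexError, sharp[chord + "#"] missing = KeyError)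
def convertMapping? (data : List Char) : Option (List Char) :=
  data.foldl
    (fun acc x =>
      match acc with
      | none => none
      | some tmp =>
        if x = '#' then
          match tmp.getLast? with
          | none => none
          | some chord =>
            match sharpChar? chord with
            | none => none
            | some c => some (tmp.dropLast ++ [c])
        else some (tmp ++ [x]))
    (some [])

-- the body of A's `for i in range(len(musicinfos))` loop; `answer` unchanged exactly where
-- Python A raises (malformed record / int() failure / empty chord division) — outside Pre_
def stepA (mm : List Char) (answer : List (Int × Int × String)) (p : Int × String) :
    List (Int × Int × String) :=
  match PySem.Str.split? p.2 "," with
  | some [st, et, title, chord] =>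
    match PySem.Chars.splitOn st.toList [':'], PySem.Chars.splitOn et.toList [':'] with
    | s0 :: s1 :: _, e0 :: e1 :: _ =>
      match PySem.Int.ofChars? s0, PySem.Int.ofChars? s1,
            PySem.Int.ofChars? e0, PySem.Int.ofChars? e1 with
      | some sh, some sm, some eh, some em =>
        let startT := 60 * sh + sm
        let endT := 60 * eh + em
        let play := endT - startT
        if play ≤ 0 then answer
        else
          match convertMapping? chord.toList with
          | none => answer
          | some cl =>
            if cl = [] then answer  -- play // 0 : ZeroDivisionError in Python (outside Pre_)
            else
              let clist :=
                if (cl.length : Int) > play then PySem.List.slice cl none (some play)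
                else
                  let cl2 := PySem.List.pyRepeat cl (PySem.Int.floordiv play (cl.length : Int))
                  cl2 ++ PySem.List.slice cl2 none (some (play - (cl2.length : Int)))
              if PySem.Chars.isIn mm clist then answer ++ [(play, p.1, title)] else answer
      | _, _, _, _ => answer
    | _, _ => answer
  | _ => answer

def solution (m : String) (musicinfos : List String) : String :=
  match convertMapping? m.toList with
  | none => ""  -- convert_mapping(m) raises in Python (outside Pre_)
  | some mm =>
    let answer := (PySem.List.enumerate musicinfos).foldl (stepA mm) []
    if answer.length > 0 then
      match PySem.List.sorted2 answer (fun x => -x.1) (fun x => x.2.1) with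
      | [] => "(None)"  -- unreachable: sorted2 of a non-empty list
      | x :: _ => x.2.2
    else "(None)"

-- ===== PORT B =====
-- Source B's decode: lookahead scan, a letter followed by '#' becomes its lowercase code;
-- none exactly where SHARP[data[i]] raises KeyError
def decodeB : List Char → Option (List Char)
  | [] => some []
  | [c] => some [c]
  | c :: d :: rest =>
    if d = '#' then
      match sharpChar? c with
      | none => none
      | some l => (decodeB rest).map (l :: ·)
    else (decodeB (d :: rest)).map (c :: ·)

-- Source B's occurs: any start residue s < len(mel) with s+len(target) <= play_time and a
-- modular-index character match
def occursB (target mel : List Char) (play : Int) : Bool :=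
  (List.range mel.length).any (fun s =>
    decide ((s : Int) + (target.length : Int) ≤ play) &&
      (List.range target.length).all (fun k =>
        target.getD k ' ' == mel.getD ((s + k) % mel.length) ' '))

-- the body of B's loop: running best (strict '>')
def stepB (target : List Char) (best : Int × String) (info : String) : Int × String :=
  match PySem.Str.split? info "," with
  | some [st, et, title, chord] =>
    match PySem.Chars.splitOn st.toList [':'], PySem.Chars.splitOn et.toList [':'] with
    | s0 :: s1 :: _, e0 :: e1 :: _ =>
      match PySem.Int.ofChars? s0, PySem.Int.ofChars? s1,
            PySem.Int.ofChars? e0, PySem.Int.ofChars? e1 with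
      | some sh, some sm, some eh, some em =>
        let play := (60 * eh + em) - (60 * sh + sm)
        if play ≤ 0 then best
        else
          match decodeB chord.toList with
          | none => best
          | some mel =>
            if occursB target mel play && decide (best.1 < play) then (play, title) else best
      | _, _, _, _ => best
    | _, _ => best
  | _ => best

def solution_alt (m : String) (musicinfos : List String) : String :=
  match decodeB m.toList with
  | none => ""
  | some target => (musicinfos.foldl (stepB target) ((0 : Int), "(None)")).2

-- ===== PRECONDITION & SPEC =====
-- convert_mapping succeeds iff every '#' directly follows one of C D F G A E
def convOk : List Char → Bool
  | [] => true
  | [c] => decide (c ≠ '#')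
  | c :: d :: rest =>
    if d = '#' then (sharpChar? c).isSome && convOk rest
    else decide (c ≠ '#') && convOk (d :: rest)

def timeOk (t : String) : Bool :=
  match PySem.Chars.splitOn t.toList [':'] with
  | p0 :: p1 :: _ => (PySem.Int.ofChars? p0).isSome && (PySem.Int.ofChars? p1).isSome
  | _ => false

def toMin (t : String) : Int :=
  match PySem.Chars.splitOn t.toList [':'] with
  | p0 :: p1 :: _ => 60 * (PySem.Int.ofChars? p0).getD 0 + (PySem.Int.ofChars? p1).getD 0
  | _ => 0

def recOk (music : String) : Bool :=
  match PySem.Str.split? music "," with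
  | some [st, et, _title, chord] =>
    timeOk st && timeOk et &&
      (decide (toMin et - toMin st ≤ 0) || (convOk chord.toList && decide (chord ≠ "")))
  | _ => false

-- Pre_ excludes exactly the inputs where Python A raises: an invalid '#' in m or a chord,
-- a record that does not split into 4 comma fields, a time field without two int()-parsable
-- ':' parts, or an empty chord with positive play time (ZeroDivisionError).
def Pre_solution (m : String) (musicinfos : List String) : Prop :=
  (convOk m.toList && musicinfos.all recOk) = true
instance (m : String) (musicinfos : List String) : Decidable (Pre_solution m musicinfos) := by
  unfold Pre_solution; infer_instance

def pvWitness_solution : String × List String :=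
  ("ABCDEFG", ["12:00,12:14,HELLO,C#BCC#BCC#BC", "13:00,13:05,WORLD,ABCDEF"])

def Spec_solution (m : String) (musicinfos : List String) (out : String) : Prop :=
  out = solution_alt m musicinfos
instance (m : String) (musicinfos : List String) (out : String) :
    Decidable (Spec_solution m musicinfos out) := by unfold Spec_solution; infer_instance

-- ===== CLAIM (what is proved, stated in full; the proofs are below) =====
def Claim_equal_solution : Prop := ∀ (m : String) (musicinfos : List String),
  Dom_solution m musicinfos → Pre_solution m musicinfos →
    Spec_solution m musicinfos (solution m musicinfos)

-- ===== LEMMAS AND PROOFS =====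

-- proof-side helpers
def b0 : Int × String := ((0 : Int), "(None)")

def bestStep (b : Int × String) (x : Int × Int × String) : Int × String :=
  if b.1 < x.1 then (x.1, x.2.2) else b

-- the comparison sorted2 uses with keys (-x.1, x.2.1)
def beforeK (x h : Int × Int × String) : Bool :=
  decide (-x.1 < -h.1) || (!decide (-h.1 < -x.1) && decide (x.2.1 < h.2.1))

-- the per-record outcome both loop bodies share: some (play_time, title) iff A appends
def hitA (mm : List Char) (music : String) : Option (Int × String) :=
  match PySem.Str.split? music "," with
  | some [st, et, title, chord] =>
    match PySem.Chars.splitOn st.toList [':'], PySem.Chars.splitOn et.toList [':'] with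
    | s0 :: s1 :: _, e0 :: e1 :: _ =>
      match PySem.Int.ofChars? s0, PySem.Int.ofChars? s1,
            PySem.Int.ofChars? e0, PySem.Int.ofChars? e1 with
      | some sh, some sm, some eh, some em =>
        let play := (60 * eh + em) - (60 * sh + sm)
        if play ≤ 0 then none
        else
          match convertMapping? chord.toList with
          | none => none
          | some cl =>
            if cl = [] then none
            else
              let clist :=
                if (cl.length : Int) > play then PySem.List.slice cl none (some play)
                else
                  let cl2 := PySem.List.pyRepeat cl (PySem.Int.floordiv play (cl.length : Int))
                  cl2 ++ PySem.List.slice cl2 none (some (play - (cl2.length : Int)))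
              if PySem.Chars.isIn mm clist then some (play, title) else none
      | _, _, _, _ => none
    | _, _ => none
  | _ => none

-- A's convert_mapping loop body, named for the proofs
def convStep : Option (List Char) → Char → Option (List Char) :=
  fun acc x =>
    match acc with
    | none => none
    | some tmp =>
      if x = '#' then
        match tmp.getLast? with
        | none => none
        | some chord =>
          match sharpChar? chord with
          | none => none
          | some c => some (tmp.dropLast ++ [c])
      else some (tmp ++ [x])

lemma convertMapping_eq (data : List Char) :
    convertMapping? data = data.foldl convStep (some []) := rfl

lemma convStep_ne (tmp : List Char) (x : Char) (hx : ¬ (x = '#')) :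
    convStep (some tmp) x = some (tmp ++ [x]) := by
  simp [convStep, hx]

lemma convStep_sharp (tmp : List Char) (c l : Char) (hl : sharpChar? c = some l) :
    convStep (some (tmp ++ [c])) '#' = some (tmp ++ [l]) := by
  simp [convStep, hl]

lemma conv_agree : ∀ (data : List Char), convOk data = true →
    ∃ out, decodeB data = some out ∧
      ∀ tmp, data.foldl convStep (some tmp) = some (tmp ++ out) := by
  intro data
  induction data using decodeB.induct with
  | case1 => intro _; exact ⟨[], rfl, by simp⟩
  | case2 c =>
    intro h
    have hc : ¬ (c = '#') := by simpa [convOk] using h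
    exact ⟨[c], rfl, fun tmp => by simp [List.foldl, convStep_ne tmp c hc]⟩
  | case3 c rest hnone =>
    intro h
    rw [convOk, if_pos rfl, Bool.and_eq_true, Option.isSome_iff_exists] at h
    obtain ⟨⟨l, hl⟩, _⟩ := h
    rw [hnone] at hl
    cases hl
  | case4 c rest l hl ih =>
    intro h
    rw [convOk, if_pos rfl, Bool.and_eq_true] at h
    obtain ⟨out', hdec, hfold⟩ := ih h.2
    have hc : ¬ (c = '#') := by
      intro he; subst he; simp [sharpChar?] at hl
    refine ⟨l :: out', by simp [decodeB, hl, hdec], ?_⟩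
    intro tmp
    rw [List.foldl_cons, convStep_ne tmp c hc, List.foldl_cons,
      convStep_sharp tmp c l hl, hfold (tmp ++ [l])]
    simp
  | case5 c d rest hd ih =>
    intro h
    rw [convOk, if_neg hd, Bool.and_eq_true] at h
    obtain ⟨out', hdec, hfold⟩ := ih h.2
    have hc : ¬ (c = '#') := by simpa using h.1
    refine ⟨c :: out', by simp [decodeB, hd, hdec], ?_⟩
    intro tmp
    rw [List.foldl_cons, convStep_ne tmp c hc, hfold (tmp ++ [c])]
    simp

lemma decodeB_cons_ne_nil (data out : List Char) (h : decodeB data = some out)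
    (hd : data ≠ []) : out ≠ [] := by
  match data, hd with
  | [c], _ => simp [decodeB] at h; simp [← h]
  | c :: d :: rest, _ =>
    rw [decodeB] at h
    split at h
    · cases hsc : sharpChar? c <;> rw [hsc] at h
      · cases h
      · obtain ⟨o, _, rfl⟩ := Option.map_eq_some_iff.mp h; simp
    · obtain ⟨o, _, rfl⟩ := Option.map_eq_some_iff.mp h; simp

lemma sliceNat (xs : List Char) (k : Nat) :
    PySem.List.slice xs none (some (k : Int)) = xs.take k := by
  rw [PySem.List.slice_to xs (Int.natCast_nonneg k)]
  simp

lemma expansion (cl : List Char) (play : Int) (hcl : cl ≠ []) (hp : 0 < play) :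
    (if (cl.length : Int) > play then PySem.List.slice cl none (some play)
     else
       (PySem.List.pyRepeat cl (PySem.Int.floordiv play (cl.length : Int))) ++
         PySem.List.slice (PySem.List.pyRepeat cl (PySem.Int.floordiv play (cl.length : Int)))
           none (some (play - ((PySem.List.pyRepeat cl (PySem.Int.floordiv play (cl.length : Int))).length : Int)))) =
    ((List.replicate (play.toNat / cl.length + 1) cl).flatten).take play.toNat := by
  have hL : 0 < cl.length := List.length_pos_iff.mpr hcl
  obtain ⟨pn, rfl⟩ : ∃ pn : Nat, play = (pn : Nat) :=
    ⟨play.toNat, (Int.toNat_of_nonneg hp.le).symm⟩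
  rw [Int.toNat_natCast]
  have hq : PySem.Int.floordiv (pn : Int) (cl.length : Int) = ((pn / cl.length : Nat) : Int) :=
    PySem.Int.floordiv_natCast pn cl.length
  rw [hq]
  have hlen : ∀ k : Nat, (PySem.List.pyRepeat cl (k : Int)).length = k * cl.length := by
    intro k
    simp [PySem.List.pyRepeat, List.length_flatten, List.map_replicate, List.sum_replicate,
      smul_eq_mul]
  have hrepn : ∀ k : Nat, PySem.List.pyRepeat cl (k : Int) = (List.replicate k cl).flatten := by
    intro k; simp [PySem.List.pyRepeat]
  by_cases hgt : (cl.length : Int) > (pn : Int)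
  · rw [if_pos hgt, sliceNat]
    have hpnL : pn < cl.length := by exact_mod_cast hgt
    have hq0 : pn / cl.length = 0 := Nat.div_eq_of_lt hpnL
    rw [hq0]
    simp
  · rw [if_neg hgt]
    have hLpn : cl.length ≤ pn := by
      by_contra hc
      exact hgt (by exact_mod_cast Nat.lt_of_not_le hc)
    set L := cl.length with hLdef
    set qn := pn / L with hqn
    set r := pn % L with hrdef
    have hdm : qn * L + r = pn := by
      rw [hqn, hrdef, Nat.mul_comm]
      exact Nat.div_add_mod pn L
    have hrltL : r < L := Nat.mod_lt pn hL
    have hq1 : 1 ≤ qn := (Nat.one_le_div_iff hL).mpr hLpn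
    have hqLle : qn * L ≤ pn := Nat.le.intro hdm
    rw [hlen qn]
    have hsub : ((pn : Int) - ((qn * L : Nat) : Int)) = (((pn - qn * L : Nat)) : Int) :=
      (Nat.cast_sub hqLle).symm
    rw [hsub, sliceNat, hrepn]
    have hr2 : pn - qn * L = r := by
      rw [← hdm, Nat.add_sub_cancel_left]
    rw [hr2]
    have hpn2 : pn = qn * L + r := hdm.symm
    rw [hpn2]
    have hFlen : ((List.replicate qn cl).flatten).length = qn * L := by
      rw [hLdef]
      simp [List.length_flatten, List.map_replicate, List.sum_replicate, smul_eq_mul]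
    have hsucc : (List.replicate (qn + 1) cl).flatten =
        (List.replicate qn cl).flatten ++ cl := by
      rw [List.replicate_succ', List.flatten_append]
      simp
    rw [hsucc]
    have htake1 : List.take (qn * L + r) ((List.replicate qn cl).flatten ++ cl) =
        (List.replicate qn cl).flatten ++ List.take r cl := by
      rw [← hFlen, List.take_append, Nat.add_sub_cancel_left,
        List.take_of_length_le (Nat.le_add_right _ _)]
    rw [htake1]
    congr 1
    obtain ⟨qm, hqm⟩ : ∃ qm, qn = qm + 1 := ⟨qn - 1, by omega⟩
    rw [hqm, List.replicate_succ, List.flatten_cons]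
    rw [List.take_append_of_le_length (by omega)]

lemma flat_getElem? (l : List Char) : ∀ (n i : Nat), i < n * l.length →
    ((List.replicate n l).flatten)[i]? = l[i % l.length]? := by
  intro n
  induction n with
  | zero => intro i hi; omega
  | succ k ih =>
    intro i hi
    rw [List.replicate_succ, List.flatten_cons]
    by_cases hil : i < l.length
    · rw [List.getElem?_append_left hil, Nat.mod_eq_of_lt hil]
    · have hL : l.length ≤ i := Nat.le_of_not_lt hil
      rw [List.getElem?_append_right hL, Nat.mod_eq_sub_mod hL]
      have hm : (k + 1) * l.length = k * l.length + l.length := by ring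
      exact ih (i - l.length) (by omega)

lemma occurs_eq (target cl : List Char) (pn : Nat) (hcl : cl ≠ []) :
    occursB target cl (pn : Int) =
      PySem.Chars.isIn target (((List.replicate (pn / cl.length + 1) cl).flatten).take pn) := by
  have hL : 0 < cl.length := List.length_pos_iff.mpr hcl
  set L := cl.length with hLdef
  set T := target.length with hTdef
  set full := ((List.replicate (pn / L + 1) cl).flatten).take pn with hfull
  have hflatlen : ((List.replicate (pn / L + 1) cl).flatten).length = (pn / L + 1) * L := by
    simp [List.length_flatten, List.map_replicate, List.sum_replicate, smul_eq_mul, hLdef]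
  have hpnle : pn ≤ (pn / L + 1) * L := by
    have h1 : (pn / L + 1) * L = L * (pn / L) + L := by ring
    have h2 := Nat.div_add_mod pn L
    have h3 := Nat.mod_lt pn hL
    omega
  have hfullen : full.length = pn := by
    rw [hfull, List.length_take, hflatlen]
    omega
  have hfget : ∀ i, i < pn → full[i]? = cl[i % L]? := by
    intro i hi
    rw [hfull, List.getElem?_take_of_lt hi]
    exact flat_getElem? cl (pn / L + 1) i (by rw [← hLdef]; omega)
  rw [Bool.eq_iff_iff]
  constructor
  · intro hocc
    rw [occursB, List.any_eq_true] at hocc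
    obtain ⟨s, hs, hcond⟩ := hocc
    rw [List.mem_range] at hs
    rw [Bool.and_eq_true, decide_eq_true_eq, List.all_eq_true] at hcond
    obtain ⟨hsum, hall⟩ := hcond
    have hsum' : s + T ≤ pn := by exact_mod_cast hsum
    apply (PySem.Chars.exists_prefix_drop_iff_isIn (sub := target) (s := full)).mp
    refine ⟨s, ?_⟩
    rw [List.prefix_iff_getElem?]
    intro i hi
    have hmod : (s + i) % L < L := Nat.mod_lt _ hL
    have h1 := hall i (List.mem_range.mpr hi)
    rw [beq_iff_eq, List.getD_eq_getElem target ' ' hi,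
      List.getD_eq_getElem cl ' ' hmod] at h1
    rw [List.getElem?_drop, hfget (s + i) (by omega), List.getElem?_eq_getElem hmod, h1]
  · intro hin
    obtain ⟨j, hpre⟩ := (PySem.Chars.exists_prefix_drop_iff_isIn (sub := target) (s := full)).mpr hin
    rw [occursB, List.any_eq_true]
    by_cases hT : T = 0
    · refine ⟨0, List.mem_range.mpr hL, ?_⟩
      rw [Bool.and_eq_true, decide_eq_true_eq, List.all_eq_true]
      constructor
      · rw [← hTdef, hT]; exact_mod_cast Nat.zero_le pn
      · intro k hk; rw [← hTdef, hT] at hk; simp at hk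
    · have hTle : T ≤ full.length - j := by
        have := hpre.length_le
        simpa [List.length_drop] using this
      have hjT : j + T ≤ pn := by omega
      rw [List.prefix_iff_getElem?] at hpre
      refine ⟨j % L, List.mem_range.mpr (Nat.mod_lt _ hL), ?_⟩
      rw [Bool.and_eq_true, decide_eq_true_eq, List.all_eq_true]
      have hjm : j % L ≤ j := Nat.mod_le _ _
      constructor
      · push_cast; omega
      · intro k hk
        rw [List.mem_range] at hk
        have h1 := hpre k hk
        rw [List.getElem?_drop, hfget (j + k) (by omega)] at h1
        have hmod : (j % L + k) % L < L := Nat.mod_lt _ hL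
        have hmodeq : (j + k) % L = (j % L + k) % L := (Nat.mod_add_mod j L k).symm
        rw [beq_iff_eq, List.getD_eq_getElem target ' ' hk,
          List.getD_eq_getElem cl ' ' hmod]
        rw [hmodeq, List.getElem?_eq_getElem hmod] at h1
        exact (Option.some_inj.mp h1).symm

lemma stepA_eq (mm : List Char) (answer : List (Int × Int × String)) (p : Int × String) :
    stepA mm answer p =
      match hitA mm p.2 with
      | some (play, title) => answer ++ [(play, p.1, title)]
      | none => answer := by
  unfold stepA hitA
  cases h1 : PySem.Str.split? p.2 "," with
  | none => rfl
  | some l =>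
    try simp only [h1]
    rcases l with _ | ⟨st, _ | ⟨et, _ | ⟨title, _ | ⟨chord, _ | ⟨x, l⟩⟩⟩⟩⟩ <;> try rfl
    cases h2 : PySem.Chars.splitOn st.toList [':'] with
    | nil => (try simp only [h2]) <;> rfl
    | cons s0 stl =>
      try simp only [h2]
      cases stl with
      | nil => rfl
      | cons s1 stl2 =>
        cases h3 : PySem.Chars.splitOn et.toList [':'] with
        | nil => (try simp only [h3]) <;> rfl
        | cons e0 etl =>
          try simp only [h3]
          cases etl with
          | nil => rfl
          | cons e1 etl2 =>
            cases h4 : PySem.Int.ofChars? s0 with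
            | none => (try simp only [h4]) <;> rfl
            | some sh =>
            try simp only [h4]
            cases h5 : PySem.Int.ofChars? s1 with
            | none => (try simp only [h5]) <;> rfl
            | some sm =>
            try simp only [h5]
            cases h6 : PySem.Int.ofChars? e0 with
            | none => (try simp only [h6]) <;> rfl
            | some eh =>
            try simp only [h6]
            cases h7 : PySem.Int.ofChars? e1 with
            | none => (try simp only [h7]) <;> rfl
            | some em =>
            try simp only [h7]
            by_cases hple : (60 * eh + em) - (60 * sh + sm) ≤ 0
            · rw [if_pos hple, if_pos hple]
            · rw [if_neg hple, if_neg hple]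
              cases h8 : convertMapping? chord.toList with
              | none => (try simp only [h8]) <;> rfl
              | some cl =>
              try simp only [h8]
              by_cases hcl : cl = []
              · rw [if_pos hcl, if_pos hcl]
              · rw [if_neg hcl, if_neg hcl]
                cases hin : PySem.Chars.isIn mm
                    (if (cl.length : Int) > (60 * eh + em) - (60 * sh + sm) then
                      PySem.List.slice cl none (some ((60 * eh + em) - (60 * sh + sm)))
                    else
                      (PySem.List.pyRepeat cl (PySem.Int.floordiv ((60 * eh + em) - (60 * sh + sm)) (cl.length : Int))) ++
                        PySem.List.slice (PySem.List.pyRepeat cl (PySem.Int.floordiv ((60 * eh + em) - (60 * sh + sm)) (cl.length : Int)))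
                          none (some (((60 * eh + em) - (60 * sh + sm)) - ((PySem.List.pyRepeat cl (PySem.Int.floordiv ((60 * eh + em) - (60 * sh + sm)) (cl.length : Int))).length : Int)))) <;>
                  simp [hin]

lemma hitA_pos (mm : List Char) (music : String) (play : Int) (title : String)
    (h : hitA mm music = some (play, title)) : 0 < play := by
  unfold hitA at h
  simp only [ite_self] at h
  repeat' split at h <;> try (cases h)
  all_goals omega

lemma stepB_eq (target : List Char) (best : Int × String) (info : String)
    (hrec : recOk info = true) :
    stepB target best info =
      match hitA target info with
      | some (play, title) => bestStep best (play, 0, title)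
      | none => best := by
  unfold recOk at hrec
  unfold stepB hitA
  cases h1 : PySem.Str.split? info "," with
  | none => rw [h1] at hrec; try cases hrec
  | some l =>
    rw [h1] at hrec
    rcases l with _ | ⟨st, _ | ⟨et, _ | ⟨title, _ | ⟨chord, _ | ⟨x, l⟩⟩⟩⟩⟩ <;>
      try exact (Bool.false_ne_true hrec).elim
    simp only [Bool.and_eq_true] at hrec
    obtain ⟨⟨hst, het⟩, hrest⟩ := hrec
    unfold timeOk at hst het
    cases h2 : PySem.Chars.splitOn st.toList [':'] with
    | nil => rw [h2] at hst; try cases hst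
    | cons s0 stl =>
      rw [h2] at hst
      try simp only [h2]
      cases stl with
      | nil => cases hst
      | cons s1 stl2 =>
        rw [Bool.and_eq_true, Option.isSome_iff_exists, Option.isSome_iff_exists] at hst
        obtain ⟨⟨sh, h4⟩, ⟨sm, h5⟩⟩ := hst
        cases h3 : PySem.Chars.splitOn et.toList [':'] with
        | nil => rw [h3] at het; try cases het
        | cons e0 etl =>
          rw [h3] at het
          try simp only [h3]
          cases etl with
          | nil => cases het
          | cons e1 etl2 =>
            rw [Bool.and_eq_true, Option.isSome_iff_exists, Option.isSome_iff_exists] at het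
            obtain ⟨⟨eh, h6⟩, ⟨em, h7⟩⟩ := het
            try simp only [h4, h5, h6, h7]
            have htoS : toMin st = 60 * sh + sm := by
              unfold toMin; rw [h2]; simp [h4, h5]
            have htoE : toMin et = 60 * eh + em := by
              unfold toMin; rw [h3]; simp [h6, h7]
            rw [htoS, htoE] at hrest
            by_cases hple : (60 * eh + em) - (60 * sh + sm) ≤ 0
            · rw [if_pos hple, if_pos hple]
            · rw [if_neg hple, if_neg hple]
              have hconv : (convOk chord.toList && decide (chord ≠ "")) = true := by
                rcases Bool.or_eq_true_iff.mp hrest with h | h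
                · exact absurd (of_decide_eq_true h) (by omega)
                · exact h
              rw [Bool.and_eq_true] at hconv
              obtain ⟨hcOk, hcne⟩ := hconv
              obtain ⟨cl, hdecB, hfold⟩ := conv_agree chord.toList hcOk
              have hdecA : convertMapping? chord.toList = some cl := by
                rw [convertMapping_eq]
                simpa using hfold []
              have hchne : chord.toList ≠ [] := by
                intro he
                apply of_decide_eq_true hcne
                exact String.toList_inj.mp (by simpa using he)
              have hclne : cl ≠ [] := decodeB_cons_ne_nil chord.toList cl hdecB hchne
              rw [hdecA, hdecB]
              simp only [if_neg hclne]
              set play : Int := (60 * eh + em) - (60 * sh + sm) with hplay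
              have hppos : 0 < play := by omega
              have hcast : play = ((play.toNat : Nat) : Int) :=
                (Int.toNat_of_nonneg hppos.le).symm
              have hocc : occursB target cl play =
                  PySem.Chars.isIn target
                    (((List.replicate (play.toNat / cl.length + 1) cl).flatten).take play.toNat) := by
                rw [hcast]
                rw [Int.toNat_natCast]
                exact occurs_eq target cl play.toNat hclne
              rw [expansion cl play hclne hppos, hocc]
              cases hin : PySem.Chars.isIn target
                  (((List.replicate (play.toNat / cl.length + 1) cl).flatten).take play.toNat) with
              | false => simp
              | true => simp [bestStep]

lemma ansInv (mm : List Char) : ∀ (infos : List String) (s : Int)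
    (acc : List (Int × Int × String)),
    (∀ a ∈ acc, a.2.1 < s) →
    acc.Pairwise (fun a b => a.2.1 < b.2.1) →
    (∀ a ∈ acc, 0 < a.1) →
    (∀ a ∈ (PySem.List.enumerate infos s).foldl (stepA mm) acc, a.2.1 < s + infos.length) ∧
      ((PySem.List.enumerate infos s).foldl (stepA mm) acc).Pairwise (fun a b => a.2.1 < b.2.1) ∧
      (∀ a ∈ (PySem.List.enumerate infos s).foldl (stepA mm) acc, 0 < a.1) := by
  intro infos
  induction infos with
  | nil =>
    intro s acc h1 h2 h3
    simp only [PySem.List.enumerate_nil, List.foldl_nil, List.length_nil]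
    exact ⟨fun a ha => by have := h1 a ha; push_cast; omega, h2, h3⟩
  | cons info is ih =>
    intro s acc h1 h2 h3
    rw [PySem.List.enumerate_cons]
    simp only [List.foldl_cons]
    have hstep := stepA_eq mm acc (s, info)
    have key : ∀ acc', (∀ a ∈ acc', a.2.1 < s + 1) →
        acc'.Pairwise (fun a b => a.2.1 < b.2.1) → (∀ a ∈ acc', 0 < a.1) →
        (∀ a ∈ (PySem.List.enumerate is (s + 1)).foldl (stepA mm) acc',
            a.2.1 < s + (info :: is).length) ∧
          ((PySem.List.enumerate is (s + 1)).foldl (stepA mm) acc').Pairwise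
            (fun a b => a.2.1 < b.2.1) ∧
          (∀ a ∈ (PySem.List.enumerate is (s + 1)).foldl (stepA mm) acc', 0 < a.1) := by
      intro acc' g1 g2 g3
      obtain ⟨r1, r2, r3⟩ := ih (s + 1) acc' g1 g2 g3
      refine ⟨fun a ha => ?_, r2, r3⟩
      have := r1 a ha
      simp only [List.length_cons]
      push_cast at this ⊢
      omega
    rw [hstep]
    cases hh : hitA mm (s, info).2 with
    | none =>
      exact key acc (fun a ha => by have := h1 a ha; omega) h2 h3
    | some pt =>
      obtain ⟨play, title⟩ := pt
      have hplay : 0 < play := hitA_pos mm (s, info).2 play title hh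
      refine key (acc ++ [(play, s, title)]) ?_ ?_ ?_
      · intro a ha
        rcases List.mem_append.mp ha with h | h
        · have := h1 a h; omega
        · simp at h; subst h; show s < s + 1; omega
      · rw [List.pairwise_append]
        refine ⟨h2, by simp, ?_⟩
        intro a ha b hb
        simp at hb; subst hb
        exact h1 a ha
      · intro a ha
        rcases List.mem_append.mp ha with h | h
        · exact h3 a h
        · simp at h; subst h; exact hplay

lemma fusion (mm : List Char) : ∀ (infos : List String) (s : Int)
    (acc : List (Int × Int × String)),
    (∀ info ∈ infos, recOk info = true) →
    infos.foldl (stepB mm) (acc.foldl bestStep b0) =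
      ((PySem.List.enumerate infos s).foldl (stepA mm) acc).foldl bestStep b0 := by
  intro infos
  induction infos with
  | nil => intro s acc _; simp [PySem.List.enumerate_nil]
  | cons info is ih =>
    intro s acc hrec
    rw [PySem.List.enumerate_cons]
    simp only [List.foldl_cons]
    rw [stepB_eq mm _ info (hrec info List.mem_cons_self), stepA_eq]
    cases hh : hitA mm info with
    | none => exact ih (s + 1) acc (fun i hi => hrec i (List.mem_cons_of_mem info hi))
    | some pt =>
      obtain ⟨play, title⟩ := pt
      have h1 : bestStep (acc.foldl bestStep b0) (play, 0, title) =
          (acc ++ [(play, s, title)]).foldl bestStep b0 := by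
        rw [List.foldl_append]
        rfl
      show List.foldl (stepB mm) (bestStep (List.foldl bestStep b0 acc) (play, 0, title)) is =
        List.foldl bestStep b0
          (List.foldl (stepA mm) (acc ++ [(play, s, title)]) (PySem.List.enumerate is (s + 1)))
      rw [h1]
      exact ih (s + 1) (acc ++ [(play, s, title)])
        (fun i hi => hrec i (List.mem_cons_of_mem info hi))

lemma head?_foldl_insertBy (before : (Int × Int × String) → (Int × Int × String) → Bool) :
    ∀ (l acc : List (Int × Int × String)) (h : Int × Int × String), acc.head? = some h →
      (l.foldl (fun acc x => PySem.List.insertBy before x acc) acc).head? =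
        some (l.foldl (fun h x => if before x h then x else h) h) := by
  intro l
  induction l with
  | nil => intro acc h hacc; simpa using hacc
  | cons x l ih =>
    intro acc h hacc
    cases acc with
    | nil => simp at hacc
    | cons a as =>
      obtain rfl : a = h := by simpa using hacc
      simp only [List.foldl_cons]
      have hins : PySem.List.insertBy before x (a :: as) =
          if before x a then x :: a :: as else a :: PySem.List.insertBy before x as := by
        rfl
      rw [hins]
      by_cases hb : before x a = true
      · rw [if_pos hb, if_pos hb]
        exact ih _ x rfl
      · rw [if_neg hb, if_neg (by simpa using hb)]
        exact ih _ a rfl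

lemma sel_aux : ∀ (rest : List (Int × Int × String)) (a : Int × Int × String),
    (∀ x ∈ rest, a.2.1 < x.2.1) →
    rest.Pairwise (fun p q => p.2.1 < q.2.1) →
    rest.foldl bestStep (a.1, a.2.2) =
      ((rest.foldl (fun h x => if beforeK x h then x else h) a).1,
       (rest.foldl (fun h x => if beforeK x h then x else h) a).2.2) := by
  intro rest
  induction rest with
  | nil => intro a _ _; rfl
  | cons x rest' ih =>
    intro a hmem hpw
    have hx : a.2.1 < x.2.1 := hmem x List.mem_cons_self
    have hbk : beforeK x a = decide (a.1 < x.1) := by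
      unfold beforeK
      have h2 : decide (x.2.1 < a.2.1) = false := decide_eq_false (by omega)
      rw [h2]
      simp
    simp only [List.foldl_cons]
    rw [hbk]
    rcases List.pairwise_cons.mp hpw with ⟨hxall, hpw'⟩
    by_cases hlt : a.1 < x.1
    · rw [if_pos (by simpa using hlt)]
      have hbs : bestStep (a.1, a.2.2) x = (x.1, x.2.2) := by
        unfold bestStep; rw [if_pos hlt]
      rw [hbs]
      exact ih x hxall hpw'
    · rw [if_neg (by simpa using hlt)]
      have hbs : bestStep (a.1, a.2.2) x = (a.1, a.2.2) := by
        unfold bestStep; rw [if_neg hlt]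
      rw [hbs]
      exact ih a (fun y hy => hmem y (List.mem_cons_of_mem x hy)) hpw'

-- ===== VERDICT (by name: the statement is the Claim_ definition above) =====
theorem solution_spec : Claim_equal_solution := by
  intro m musicinfos _ hpre
  show solution m musicinfos = solution_alt m musicinfos
  have hpre' := hpre
  unfold Pre_solution at hpre'
  rw [Bool.and_eq_true] at hpre'
  obtain ⟨hm, hall⟩ := hpre'
  obtain ⟨mm, hdecB, hfold⟩ := conv_agree m.toList hm
  have hdecA : convertMapping? m.toList = some mm := by
    rw [convertMapping_eq]
    simpa using hfold []
  unfold solution solution_alt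
  rw [hdecA, hdecB]
  simp only []
  have hrecs : ∀ info ∈ musicinfos, recOk info = true := by
    intro info hinfo
    exact List.all_eq_true.mp hall info hinfo
  have hfus := fusion mm musicinfos 0 [] hrecs
  simp only [List.foldl_nil] at hfus
  obtain ⟨hbound, hpw, hpos⟩ := ansInv mm musicinfos 0 [] (by simp) (by simp) (by simp)
  cases hans : (PySem.List.enumerate musicinfos).foldl (stepA mm) [] with
  | nil =>
    rw [hans] at hfus
    simp only [List.foldl_nil] at hfus
    have hbb : List.foldl (stepB mm) ((0 : Int), "(None)") musicinfos = b0 := hfus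
    rw [hbb]
    rfl
  | cons a rest =>
    rw [hans] at hfus hpw hpos
    have hbefore : (fun p q : Int × Int × String =>
        decide ((fun x : Int × Int × String => -x.1) p < (fun x : Int × Int × String => -x.1) q) ||
          (!decide ((fun x : Int × Int × String => -x.1) q < (fun x : Int × Int × String => -x.1) p) &&
            decide ((fun x : Int × Int × String => x.2.1) p < (fun x : Int × Int × String => x.2.1) q))) =
        beforeK := by
      funext p q
      simp [beforeK]
    have hhead : (PySem.List.sorted2 (a :: rest) (fun x => -x.1) (fun x => x.2.1)).head? =
        some (rest.foldl (fun h x => if beforeK x h then x else h) a) := by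
      unfold PySem.List.sorted2
      simp only [if_neg (by decide : ¬ (false = true))]
      rw [hbefore, List.foldl_cons]
      exact head?_foldl_insertBy beforeK rest [a] a rfl
    obtain ⟨tl, hsor⟩ : ∃ tl, PySem.List.sorted2 (a :: rest) (fun x => -x.1) (fun x => x.2.1) =
        (rest.foldl (fun h x => if beforeK x h then x else h) a) :: tl := by
      cases hs : PySem.List.sorted2 (a :: rest) (fun x => -x.1) (fun x => x.2.1) with
      | nil => rw [hs] at hhead; simp at hhead
      | cons z tl =>
        rw [hs] at hhead
        simp at hhead
        exact ⟨tl, by rw [hhead]⟩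
    have hlen : (a :: rest).length > 0 := by simp
    rw [if_pos hlen, hsor]
    have hb0 : bestStep b0 a = (a.1, a.2.2) := by
      simp [bestStep, b0, hpos a List.mem_cons_self]
    have hbb : List.foldl (stepB mm) ((0 : Int), "(None)") musicinfos =
        List.foldl bestStep b0 (a :: rest) := hfus
    rw [hbb]
    simp only [List.foldl_cons]
    rw [hb0]
    rcases List.pairwise_cons.mp hpw with ⟨hall2, hpw'⟩
    rw [sel_aux rest a hall2 hpw']
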